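-- pv_equiv track=rewrite | github.com/picrin/project_grasp | BIO_2017_stage1/1d.py | compute_last_row
-- ===== SOURCE A (Python) =====
-- def compute_color(A, B):
--     if A == B:
--         return A
--     if B < A:
--         C = A
--         A = B
--         B = C
--     if A == "B" and B == "R":
--         return "G"
--     elif A == "G" and B == "R":
--         return "B"
--     elif A == "B" and B == "G":
--         return "R"
--
-- def compute_last_row(first_row):
--     current_row = first_row
--     for j in range(len(current_row) - 1):
--         next_row = []
--         for i in range(len(current_row) - 1):
--              letter = compute_color(current_row[i], current_row[i + 1])
--              next_row.append(letter)
--         current_row = "".join(next_row)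
--     return current_row
-- ===== SOURCE B (Python) =====
-- _VAL = {"B": 0, "G": 1, "R": 2}
--
-- def _lucas3(m, i):
--     # C(m, i) mod 3 by Lucas' theorem over base-3 digits
--     r = 1
--     while i > 0:
--         md, idig = m % 3, i % 3
--         if md < idig:
--             return 0
--         if md == 2 and idig == 1:
--             r = r * 2 % 3
--         m //= 3
--         i //= 3
--     return r
--
-- def compute_last_row(first_row):
--     n = len(first_row)
--     if n <= 1:
--         return first_row
--     if all(c == first_row[0] for c in first_row):
--         return first_row[0]
--     m = n - 1
--     total = sum(_lucas3(m, i) * _VAL[c] for i, c in enumerate(first_row)) % 3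
--     if m % 2 == 1:
--         total = (3 - total) % 3
--     return "BGR"[total]
-- ===== Notes on version B (the rewrite author's own statement) =====
-- stated objective: faster
-- what changed: Replaces the quadratic row-by-row reduction with the closed form final = (-1)^(n-1) * sum C(n-1,i)*a_i mod 3, computing each binomial coefficient mod 3 by Lucas' theorem over base-3 digits.
import Mathlib
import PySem

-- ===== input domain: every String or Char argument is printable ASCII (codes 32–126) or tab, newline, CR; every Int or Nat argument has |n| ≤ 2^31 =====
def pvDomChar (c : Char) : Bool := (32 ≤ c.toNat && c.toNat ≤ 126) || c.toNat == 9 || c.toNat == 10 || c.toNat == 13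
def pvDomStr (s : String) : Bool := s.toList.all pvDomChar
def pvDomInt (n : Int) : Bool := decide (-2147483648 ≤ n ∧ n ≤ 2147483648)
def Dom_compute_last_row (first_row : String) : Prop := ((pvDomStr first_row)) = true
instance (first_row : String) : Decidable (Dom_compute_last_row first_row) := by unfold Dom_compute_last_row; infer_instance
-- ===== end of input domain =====

-- B replaces A's quadratic row-by-row reduction by the closed form
-- final = (-1)^(n-1) * Σ C(n-1,i)·a_i (mod 3) with binomials mod 3 via Lucas' theorem (objective: faster).


-- ===== PORT A =====
-- compute_color: Python returns None (here: none) when it falls off the end.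
def compute_color (A B : Char) : Option Char :=
  if A = B then some A
  else
    let p := if B < A then (B, A) else (A, B)
    let A := p.1
    let B := p.2
    if A = 'B' ∧ B = 'R' then some 'G'
    else if A = 'G' ∧ B = 'R' then some 'B'
    else if A = 'B' ∧ B = 'G' then some 'R'
    else none

-- inner loop: letter = compute_color(row[i], row[i+1]) for i in range(len(row)-1)
def innerA : List Char → List (Option Char)
  | a :: b :: rest => compute_color a b :: innerA (b :: rest)
  | _ => []

-- outer loop, run exactly (len(first_row) - 1) times; "".join raises TypeError on a
-- None entry (mapM returns none there) — those inputs are excluded by Pre_ and the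
-- port returns "" there.
def loopA : Nat → List Char → List Char
  | 0, row => row
  | k + 1, row =>
    match (innerA row).mapM id with
    | some next => loopA k next
    | none => []

def compute_last_row (first_row : String) : String :=
  String.ofList (loopA (first_row.length - 1) first_row.toList)

-- ===== PORT B =====
-- _lucas3: C(m, i) mod 3 by Lucas' theorem over base-3 digits (the while-loop on i)
def lucas3Aux (m i r : Nat) : Nat :=
  if h : i = 0 then r
  else
    if m % 3 < i % 3 then 0
    else lucas3Aux (m / 3) (i / 3) (if m % 3 = 2 ∧ i % 3 = 1 then r * 2 % 3 else r)
  decreasing_by exact Nat.div_lt_self (Nat.pos_of_ne_zero h) (by norm_num)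

def lucas3 (m i : Nat) : Nat := lucas3Aux m i 1

-- _VAL lookup; a key outside {B,G,R} raises KeyError in Python (excluded by Pre_)
def valB (c : Char) : Nat := if c = 'B' then 0 else if c = 'G' then 1 else 2

def compute_last_row_alt (first_row : String) : String :=
  let cs := first_row.toList
  let n := cs.length
  if n ≤ 1 then first_row
  else if cs.all (fun c => c = cs.headD 'B') then String.ofList [cs.headD 'B']
  else
    let m := n - 1
    let total := (cs.zipIdx.foldl (fun acc p => acc + lucas3 m p.2 * valB p.1) 0) % 3
    let total := if m % 2 = 1 then (3 - total) % 3 else total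
    String.ofList [(['B', 'G', 'R']).getD total 'B']

-- ===== PRECONDITION & SPEC =====
-- Pre_ admits exactly the inputs where A returns normally: strings of length ≤ 1,
-- all-{B,G,R} strings, and constant strings; on any other string of length ≥ 2 the
-- Python A raises TypeError ("".join over a None) and B raises KeyError.
def Pre_compute_last_row (first_row : String) : Prop :=
  first_row.toList.length ≤ 1
  ∨ (∀ c ∈ first_row.toList, c = 'B' ∨ c = 'G' ∨ c = 'R')
  ∨ (∀ c ∈ first_row.toList, first_row.toList.head? = some c)

instance (first_row : String) : Decidable (Pre_compute_last_row first_row) := by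
  unfold Pre_compute_last_row; infer_instance

def pvWitness_compute_last_row : String := "B"

def Spec_compute_last_row (first_row : String) (out : String) : Prop := out = compute_last_row_alt first_row
instance (first_row : String) (out : String) : Decidable (Spec_compute_last_row first_row out) := by unfold Spec_compute_last_row; infer_instance

-- ===== CLAIM (what is proved, stated in full; the proofs are below) =====
def Claim_equal_compute_last_row : Prop := ∀ (first_row : String), Dom_compute_last_row first_row → Pre_compute_last_row first_row → Spec_compute_last_row first_row (compute_last_row first_row)

-- ===== LEMMAS AND PROOFS =====

-- encoding of colours into ZMod 3 and back
def enc (c : Char) : ZMod 3 := if c = 'B' then 0 else if c = 'G' then 1 else 2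
def dec (x : ZMod 3) : Char := if x = 0 then 'B' else if x = 1 then 'G' else 'R'

-- model of one reduction row over ZMod 3
def mstep : List (ZMod 3) → List (ZMod 3)
  | a :: b :: rest => (-(a + b)) :: mstep (b :: rest)
  | _ => []

def mloop : Nat → List (ZMod 3) → List (ZMod 3)
  | 0, l => l
  | k + 1, l => mloop k (mstep l)

def isBGR (c : Char) : Prop := c = 'B' ∨ c = 'G' ∨ c = 'R'

theorem dec_enc {c : Char} (h : isBGR c) : dec (enc c) = c := by
  rcases h with h | h | h <;> subst h <;> decide

theorem compute_color_eq {a b : Char} (ha : isBGR a) (hb : isBGR b) :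
    compute_color a b = some (dec (-(enc a + enc b))) := by
  rcases ha with h | h | h <;> rcases hb with h' | h' | h' <;> subst h h' <;> decide

theorem isBGR_dec (x : ZMod 3) : isBGR (dec x) := by
  unfold dec isBGR; split_ifs <;> simp

theorem enc_dec (x : ZMod 3) : enc (dec x) = x := by
  fin_cases x <;> decide

theorem innerA_bgr (cs : List Char) (h : ∀ c ∈ cs, isBGR c) :
    (innerA cs).mapM id = some ((mstep (cs.map enc)).map dec) := by
  match cs with
  | [] => simp [innerA, mstep]
  | [a] => simp [innerA, mstep]
  | a :: b :: rest =>
    have ha : isBGR a := h a (by simp)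
    have hb : isBGR b := h b (by simp)
    have ih := innerA_bgr (b :: rest) (fun c hc => h c (List.mem_cons_of_mem a hc))
    simp [innerA, mstep, compute_color_eq ha hb, ih]

theorem mstep_length (l : List (ZMod 3)) : (mstep l).length = l.length - 1 := by
  match l with
  | [] => rfl
  | [a] => rfl
  | a :: b :: rest =>
    have := mstep_length (b :: rest)
    simp [mstep] at this ⊢
    omega

theorem loopA_bgr (k : Nat) (cs : List Char) (h : ∀ c ∈ cs, isBGR c) :
    loopA k cs = (mloop k (cs.map enc)).map dec := by
  match k with
  | 0 =>
    simp only [loopA, mloop, List.map_map]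
    conv_lhs => rw [← List.map_id cs]
    exact List.map_congr_left fun c hc => (dec_enc (h c hc)).symm
  | k + 1 =>
    have hmapped := innerA_bgr cs h
    have hb : ∀ c ∈ (mstep (cs.map enc)).map dec, isBGR c := by
      intro c hc
      rcases List.mem_map.mp hc with ⟨x, _, rfl⟩
      exact isBGR_dec x
    have ih := loopA_bgr k ((mstep (cs.map enc)).map dec) hb
    have hmm : ((mstep (cs.map enc)).map dec).map enc = mstep (cs.map enc) := by
      rw [List.map_map]
      conv_rhs => rw [← List.map_id (mstep (cs.map enc))]
      exact List.map_congr_left (fun x _ => enc_dec x)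
    simp only [loopA, hmapped, ih, hmm, mloop]

theorem mloop_length (k : Nat) (l : List (ZMod 3)) : (mloop k l).length = l.length - k := by
  match k with
  | 0 => simp [mloop]
  | k + 1 =>
    have := mloop_length k (mstep l)
    have := mstep_length l
    simp [mloop]
    omega

theorem mstep_getD (l : List (ZMod 3)) (i : Nat) (h : i + 1 < l.length) :
    (mstep l).getD i 0 = -(l.getD i 0 + l.getD (i + 1) 0) := by
  match l, i with
  | a :: b :: rest, 0 => rfl
  | a :: b :: rest, i + 1 =>
    have h' : i + 1 < (b :: rest).length := by simp at h ⊢; omega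
    have := mstep_getD (b :: rest) i h'
    simpa [mstep] using this

theorem pascal_sum (k : Nat) (f : Nat → ZMod 3) :
    ∑ j ∈ Finset.range (k + 2), ((k + 1).choose j : ZMod 3) * f j
      = ∑ j ∈ Finset.range (k + 1), (k.choose j : ZMod 3) * f j
        + ∑ j ∈ Finset.range (k + 1), (k.choose j : ZMod 3) * f (j + 1) := by
  rw [Finset.sum_range_succ' _ (k + 1)]
  simp only [Nat.choose_succ_succ, Nat.cast_add, add_mul, Nat.choose_zero_right, Nat.cast_one,
    one_mul]
  rw [Finset.sum_add_distrib]
  rw [Finset.sum_range_succ' (fun j => (k.choose j : ZMod 3) * f j) k]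
  rw [Finset.sum_range_succ (fun j => (k.choose (j + 1) : ZMod 3) * f (j + 1)) k]
  simp [Nat.choose_succ_self]
  ring

theorem mloop_getD (k : Nat) (l : List (ZMod 3)) (i : Nat) (h : i + k < l.length) :
    (mloop k l).getD i 0
      = (-1) ^ k * ∑ j ∈ Finset.range (k + 1), (k.choose j : ZMod 3) * l.getD (i + j) 0 := by
  match k with
  | 0 => simp [mloop]
  | k + 1 =>
    have hlen : i + k < (mstep l).length := by rw [mstep_length]; omega
    have ih := mloop_getD k (mstep l) i hlen
    have step : ∀ j ∈ Finset.range (k + 1),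
        (k.choose j : ZMod 3) * (mstep l).getD (i + j) 0
          = -((k.choose j : ZMod 3) * l.getD (i + j) 0
              + (k.choose j : ZMod 3) * l.getD (i + j + 1) 0) := by
      intro j hj
      rw [mstep_getD l (i + j) (by simp only [Finset.mem_range] at hj; omega)]
      ring
    have hps := pascal_sum k (fun j => l.getD (i + j) 0)
    have hf : ∀ j, l.getD (i + (j + 1)) 0 = l.getD (i + j + 1) 0 := by
      intro j; rw [← Nat.add_assoc]
    simp only [hf] at hps
    calc (mloop (k + 1) l).getD i 0 = (mloop k (mstep l)).getD i 0 := rfl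
      _ = (-1) ^ k * ∑ j ∈ Finset.range (k + 1),
            (k.choose j : ZMod 3) * (mstep l).getD (i + j) 0 := ih
      _ = (-1) ^ k * ∑ j ∈ Finset.range (k + 1),
            (-((k.choose j : ZMod 3) * l.getD (i + j) 0
               + (k.choose j : ZMod 3) * l.getD (i + j + 1) 0)) := by
            rw [Finset.sum_congr rfl step]
      _ = (-1) ^ (k + 1) * (∑ j ∈ Finset.range (k + 1), (k.choose j : ZMod 3) * l.getD (i + j) 0
            + ∑ j ∈ Finset.range (k + 1), (k.choose j : ZMod 3) * l.getD (i + j + 1) 0) := by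
            rw [Finset.sum_neg_distrib, Finset.sum_add_distrib]
            ring
      _ = (-1) ^ (k + 1) * ∑ j ∈ Finset.range (k + 1 + 1),
            ((k + 1).choose j : ZMod 3) * l.getD (i + j) 0 := by rw [← hps]

-- B side: lucas3 computes the binomial coefficient mod 3
theorem lucas3Aux_eq (i m r : Nat) :
    ((lucas3Aux m i r : ZMod 3)) = (r : ZMod 3) * (m.choose i : ZMod 3) := by
  haveI : Fact (Nat.Prime 3) := ⟨by norm_num⟩
  have lucas : ((m.choose i : ZMod 3))
      = ((m % 3).choose (i % 3) : ZMod 3) * ((m / 3).choose (i / 3) : ZMod 3) := by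
    have h := (ZMod.natCast_eq_natCast_iff _ _ 3).mpr
      (Choose.choose_modEq_choose_mod_mul_choose_div_nat (p := 3) (n := m) (k := i))
    push_cast at h
    exact h
  have hsmall : ¬ m % 3 < i % 3 →
      ((m % 3).choose (i % 3) : ZMod 3) = if m % 3 = 2 ∧ i % 3 = 1 then 2 else 1 := by
    intro h1
    have hm : m % 3 = 0 ∨ m % 3 = 1 ∨ m % 3 = 2 := by omega
    have hi : i % 3 = 0 ∨ i % 3 = 1 ∨ i % 3 = 2 := by omega
    rcases hm with hm | hm | hm <;> rcases hi with hi | hi | hi <;>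
      simp [hm, hi] at h1 ⊢
  rw [lucas3Aux]
  split_ifs with h0 h1 h2
  · subst h0; simp
  · rw [lucas, Nat.choose_eq_zero_of_lt h1]
    simp
  · rw [lucas3Aux_eq (i / 3) (m / 3) (r * 2 % 3), lucas, hsmall h1, if_pos h2]
    have hc : ((r * 2 % 3 : Nat) : ZMod 3) = (r : ZMod 3) * 2 := by
      rw [ZMod.natCast_mod]; push_cast; ring
    rw [hc]; ring
  · rw [lucas3Aux_eq (i / 3) (m / 3) r, lucas, hsmall h1, if_neg h2]
    ring
termination_by i
decreasing_by all_goals exact Nat.div_lt_self (Nat.pos_of_ne_zero h0) (by norm_num)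

theorem lucas3_eq (m i : Nat) : ((lucas3 m i : ZMod 3)) = (m.choose i : ZMod 3) := by
  simpa [lucas3] using lucas3Aux_eq i m 1

theorem valB_eq {c : Char} : ((valB c : ZMod 3)) = enc c := by
  unfold valB enc; split_ifs <;> simp

-- the foldl over zipIdx, cast to ZMod 3, is the binomial-weighted sum
theorem foldl_zipIdx_eq (m : Nat) (cs : List Char) (a k : Nat) :
    (((cs.zipIdx k).foldl (fun acc p => acc + lucas3 m p.2 * valB p.1) a : Nat) : ZMod 3)
      = (a : ZMod 3)
        + ∑ j ∈ Finset.range cs.length, (m.choose (k + j) : ZMod 3) * enc (cs.getD j 'B') := by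
  match cs with
  | [] => simp
  | c :: cs =>
    have ih := foldl_zipIdx_eq m cs (a + lucas3 m k * valB c) (k + 1)
    have hzip : (c :: cs).zipIdx k = (c, k) :: cs.zipIdx (k + 1) := by
      simp [List.zipIdx]
    rw [hzip]
    show ((((cs.zipIdx (k + 1)).foldl (fun acc p => acc + lucas3 m p.2 * valB p.1)
        (a + lucas3 m k * valB c) : Nat)) : ZMod 3) = _
    rw [ih]
    simp only [List.length_cons]
    rw [Finset.sum_range_succ' (fun j =>
      ((m.choose (k + j) : ZMod 3)) * enc ((c :: cs).getD j 'B')) cs.length]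
    have hre : ∀ j ∈ Finset.range cs.length,
        ((m.choose (k + (j + 1)) : ZMod 3)) * enc ((c :: cs).getD (j + 1) 'B')
          = ((m.choose (k + 1 + j) : ZMod 3)) * enc (cs.getD j 'B') := by
      intro j _
      rw [show k + (j + 1) = k + 1 + j by omega]
      rfl
    rw [Finset.sum_congr rfl hre, show (c :: cs).getD 0 'B' = c from rfl]
    push_cast [lucas3_eq, valB_eq]
    ring

-- constant rows reduce to their single letter
theorem innerA_const (a : Char) (k : Nat) :
    (innerA (List.replicate (k + 1) a)).mapM id = some (List.replicate k a) := by
  match k with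
  | 0 => rfl
  | k + 1 =>
    have ih := innerA_const a k
    show (innerA (a :: a :: List.replicate k a)).mapM id = _
    rw [show innerA (a :: a :: List.replicate k a)
          = compute_color a a :: innerA (a :: List.replicate k a) from rfl]
    rw [show innerA (a :: List.replicate k a) = innerA (List.replicate (k + 1) a) by
          rw [List.replicate_succ]]
    simp [List.mapM_cons, compute_color, ← List.replicate_succ, ih]

theorem loopA_const (k : Nat) (a : Char) :
    loopA k (List.replicate (k + 1) a) = [a] := by
  match k with
  | 0 => rfl
  | k + 1 =>
    have hinner := innerA_const a (k + 1)
    have ih := loopA_const k a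
    simp only [loopA, hinner, ih]

theorem getD_map_enc (cs : List Char) (j : Nat) :
    (cs.map enc).getD j 0 = enc (cs.getD j 'B') := by
  match cs, j with
  | [], j => simp [enc]
  | c :: cs, 0 => rfl
  | c :: cs, j + 1 => exact getD_map_enc cs j

theorem char_table (t : Nat) (h : t < 3) :
    (['B', 'G', 'R']).getD t 'B' = dec ((t : ZMod 3)) := by
  interval_cases t <;> decide

-- ===== VERDICT (by name: the statement is the Claim_ definition above) =====
theorem compute_last_row_spec : Claim_equal_compute_last_row := by
  intro s _ hpre
  unfold Spec_compute_last_row compute_last_row compute_last_row_alt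
  have hlen : s.length = s.toList.length := by simp
  set cs := s.toList with hcs
  by_cases h1 : cs.length ≤ 1
  · have hz : s.length - 1 = 0 := by omega
    rw [hz]
    simp only [loopA, if_pos h1]
    simp [hcs]
  · rw [Nat.not_le] at h1
    rw [if_neg (by omega)]
    by_cases hconst : ∀ c ∈ cs, c = cs.headD 'B'
    · -- constant row: both sides are the single head letter
      have hrep : cs = List.replicate cs.length (cs.headD 'B') :=
        List.eq_replicate_of_mem hconst
      have hall : cs.all (fun c => c = cs.headD 'B') = true := by
        simp only [List.all_eq_true, decide_eq_true_eq]
        exact hconst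
      rw [if_pos hall, hlen]
      obtain ⟨q, hq⟩ : ∃ q, cs.length = q + 1 := ⟨cs.length - 1, by omega⟩
      have key : loopA (cs.length - 1) cs = [cs.headD 'B'] := by
        rw [show cs.length - 1 = q by omega]
        conv_lhs => rw [hrep, hq]
        exact loopA_const _ _
      rw [key]
    · -- non-constant: Pre_ forces an all-BGR row; use the closed form
      have hbgr : ∀ c ∈ cs, isBGR c := by
        rcases hpre with h | h | h
        · rw [← hcs] at h; omega
        · exact h
        · exfalso
          apply hconst
          intro c hc
          have h2 := h c hc
          rw [← hcs] at h2
          have hhd : cs.headD 'B' = c := by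
            cases hcase : cs with
            | nil => rw [hcase] at h2; simp at h2
            | cons a lrest =>
              rw [hcase] at h2
              simp at h2 ⊢
              exact h2
          exact hhd.symm
      have hallf : ¬ (cs.all (fun c => c = cs.headD 'B') = true) := by
        simp only [List.all_eq_true, decide_eq_true_eq]
        exact hconst
      rw [if_neg hallf, hlen]
      rw [loopA_bgr (cs.length - 1) cs hbgr]
      set m := cs.length - 1 with hm
      set l := cs.map enc with hl
      have hllen : l.length = cs.length := by simp [hl]
      have hone : (mloop m l).length = 1 := by
        rw [mloop_length]; omega
      obtain ⟨x, hx⟩ := List.length_eq_one_iff.mp hone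
      have hx0 : x = (mloop m l).getD 0 0 := by rw [hx]; rfl
      have hgd := mloop_getD m l 0 (by omega)
      simp only [Nat.zero_add] at hgd
      set S : Nat := (cs.zipIdx.foldl (fun acc p => acc + lucas3 m p.2 * valB p.1) 0) with hS
      have hScast : ((S : ZMod 3))
          = ∑ j ∈ Finset.range cs.length, (m.choose j : ZMod 3) * enc (cs.getD j 'B') := by
        have := foldl_zipIdx_eq m cs 0 0
        simpa using this
      have hsumeq : ∑ j ∈ Finset.range (m + 1), (m.choose j : ZMod 3) * l.getD j 0
          = ((S : ZMod 3)) := by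
        rw [hScast, show m + 1 = cs.length by omega]
        exact Finset.sum_congr rfl fun j _ => by rw [hl, getD_map_enc]
      have hxS : x = (-1) ^ m * ((S : ZMod 3)) := by
        rw [hx0, hgd, hsumeq]
      -- the Nat-level result of B, and its value in ZMod 3
      set t2 : Nat := if m % 2 = 1 then (3 - S % 3) % 3 else S % 3 with ht2
      have ht2lt : t2 < 3 := by
        rw [ht2]; split_ifs <;> omega
      have ht2cast : ((t2 : Nat) : ZMod 3) = (-1) ^ m * ((S : ZMod 3)) := by
        rw [ht2]
        by_cases hodd : m % 2 = 1
        · rw [if_pos hodd]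
          have hneg : ((-1 : ZMod 3)) ^ m = -1 :=
            Odd.neg_one_pow (Nat.odd_iff.mpr hodd)
          rw [hneg]
          have h3 : S % 3 ≤ 3 := by omega
          rw [ZMod.natCast_mod, Nat.cast_sub h3, ZMod.natCast_mod]
          simp
          decide
        · rw [if_neg hodd]
          have heven : ((-1 : ZMod 3)) ^ m = 1 :=
            Even.neg_one_pow (Nat.even_iff.mpr (by omega))
          rw [heven, ZMod.natCast_mod]
          simp
      rw [hx]
      simp only [List.map_cons, List.map_nil]
      rw [char_table t2 ht2lt, ht2cast, ← hxS]
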